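-- pv_equiv track=rewrite | github.com/AliBasarann/Cmpe300-Projects | project1/main.py | func
-- ===== SOURCE A (Python) =====
-- import math
--
-- def func(arr):
--     arr2=[0,0,0,0,0]
--     n = len(arr)
--     for i in range(n):
--         if (arr[i] == 0):
--             for t1 in range(i,n):
--                 p1 = math.sqrt(t1)
--                 x1 = n+1
--                 while (x1>=1):
--                     x1 = int(x1/2)
--                     arr2[i%5] = arr2[i%5] + 1
--         elif(arr[i] == 1):
--             for t2 in range(n,0,-1):
--                 for p2 in range(1,n+1):
--                     x2 = n+1
--                     while(x2 > 0):
--                         x2 = int(x2/2)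
--                         arr2[i%5] = arr2[i%5] + 1
--         elif(arr[i] == 2):
--             for t3 in range(1,n+1):
--                 x3 = t3 + 1
--                 for p3 in range(pow(t3,2)):
--                     arr2[i%5] = arr2[i%5] + 1
--     return arr2
-- ===== SOURCE B (Python) =====
-- def func(arr):
--     # Closed-form arithmetic: each branch's nested loops counted directly, one pass.
--     n = len(arr)
--     L = (n + 1).bit_length()          # iterations of each halving while-loop
--     S = n * (n + 1) * (2 * n + 1) // 6  # sum of t3**2 for t3 in 1..n
--     arr2 = [0, 0, 0, 0, 0]
--     for i, v in enumerate(arr):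
--         if v == 0:
--             arr2[i % 5] += (n - i) * L
--         elif v == 1:
--             arr2[i % 5] += n * n * L
--         elif v == 2:
--             arr2[i % 5] += S
--     return arr2
-- ===== Notes on version B (the rewrite author's own statement) =====
-- stated objective: alternative
-- what changed: Replaces the nested counting loops (per-element inner for-loops with halving while-loops and a squared-range loop) by closed-form arithmetic: each element contributes (n-i)*bit_length(n+1), n*n*bit_length(n+1) or n(n+1)(2n+1)//6 directly in one pass.
import Mathlib
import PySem

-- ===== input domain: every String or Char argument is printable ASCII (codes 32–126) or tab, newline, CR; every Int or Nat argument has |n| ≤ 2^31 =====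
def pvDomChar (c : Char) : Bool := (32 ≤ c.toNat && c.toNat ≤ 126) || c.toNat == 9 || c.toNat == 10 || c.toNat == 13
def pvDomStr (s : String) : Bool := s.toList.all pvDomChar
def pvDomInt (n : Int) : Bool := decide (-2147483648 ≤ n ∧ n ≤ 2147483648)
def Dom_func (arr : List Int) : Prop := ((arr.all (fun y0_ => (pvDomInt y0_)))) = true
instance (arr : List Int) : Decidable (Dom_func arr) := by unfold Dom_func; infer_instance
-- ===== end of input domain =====

-- B replaces A's nested counting loops by closed-form arithmetic per element (objective: alternative).

-- ===== PORT A =====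
-- arr2[k] = arr2[k] + 1
def pvIncAt (a2 : List Int) (k : Nat) : List Int := a2.set k (a2.getD k 0 + 1)

-- 'while x1 >= 1: x1 = int(x1/2); arr2[k] += 1'  (x1 ≥ 0 and < 2^53 here, so int(x1/2) = x1 // 2 exactly)
def pvWhile1 (x : Nat) (a2 : List Int) (k : Nat) : List Int :=
  if h : 1 ≤ x then pvWhile1 (x / 2) (pvIncAt a2 k) k else a2
decreasing_by exact Nat.div_lt_self (by omega) (by omega)

-- 'while x2 > 0: x2 = int(x2/2); arr2[k] += 1'
def pvWhile2 (x : Nat) (a2 : List Int) (k : Nat) : List Int :=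
  if h : 0 < x then pvWhile2 (x / 2) (pvIncAt a2 k) k else a2
decreasing_by exact Nat.div_lt_self (by omega) (by omega)

-- 'n = len(arr)' is inlined as arr.length throughout
def func (arr : List Int) : List Int :=
  (List.range arr.length).foldl (fun a2 i =>
    if arr.getD i 0 = 0 then
      -- 'p1 = math.sqrt(t1)' is computed and never used (no effect) — dropped
      (List.range' i (arr.length - i)).foldl
        (fun a _t1 => pvWhile1 (arr.length + 1) a (i % 5)) a2
    else if arr.getD i 0 = 1 then
      -- range(n, 0, -1) = [n, n-1, …, 1]
      ((List.range' 1 arr.length).reverse).foldl (fun a _t2 =>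
        (List.range' 1 arr.length).foldl
          (fun a' _p2 => pvWhile2 (arr.length + 1) a' (i % 5)) a) a2
    else if arr.getD i 0 = 2 then
      (List.range' 1 arr.length).foldl (fun a t3 =>
        -- 'x3 = t3 + 1' is never used — dropped
        (List.range (t3 ^ 2)).foldl (fun a' _p3 => pvIncAt a' (i % 5)) a) a2
    else a2) [0, 0, 0, 0, 0]

-- ===== PORT B =====
-- arr2[k] += m
def pvAddAt (a2 : List Int) (k : Nat) (m : Int) : List Int := a2.set k (a2.getD k 0 + m)

-- L = (n+1).bit_length();  S = n*(n+1)*(2*n+1) // 6;  one pass over enumerate(arr)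
def func_alt (arr : List Int) : List Int :=
  arr.zipIdx.foldl (fun a2 vi =>
    if vi.1 = 0 then
      pvAddAt a2 (vi.2 % 5)
        (((arr.length : Int) - vi.2) * (PySem.Int.bitLength ((arr.length : Int) + 1) : Int))
    else if vi.1 = 1 then
      pvAddAt a2 (vi.2 % 5)
        ((arr.length : Int) * (arr.length : Int) * (PySem.Int.bitLength ((arr.length : Int) + 1) : Int))
    else if vi.1 = 2 then
      pvAddAt a2 (vi.2 % 5)
        (PySem.Int.floordiv ((arr.length : Int) * ((arr.length : Int) + 1) * (2 * (arr.length : Int) + 1)) 6)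
    else a2) [0, 0, 0, 0, 0]

-- ===== PRECONDITION & SPEC =====
def Spec_func (arr : List Int) (out : List Int) : Prop := out = func_alt arr
instance (arr : List Int) (out : List Int) : Decidable (Spec_func arr out) := by unfold Spec_func; infer_instance

-- ===== CLAIM (what is proved, stated in full; the proofs are below) =====
def Claim_equal_func : Prop := ∀ (arr : List Int), Dom_func arr → Spec_func arr (func arr)

-- ===== LEMMAS AND PROOFS =====

theorem pvAddAt_length (a2 : List Int) (k : Nat) (m : Int) :
    (pvAddAt a2 k m).length = a2.length := by simp [pvAddAt]

theorem pvAddAt_pvAddAt (a2 : List Int) (k : Nat) (m1 m2 : Int) (hk : k < a2.length) :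
    pvAddAt (pvAddAt a2 k m1) k m2 = pvAddAt a2 k (m1 + m2) := by
  simp [pvAddAt, List.getD, hk, List.set_set, add_assoc]

theorem pvAddAt_zero (a2 : List Int) (k : Nat) (hk : k < a2.length) :
    pvAddAt a2 k 0 = a2 := by
  simp [pvAddAt, List.getD, List.getElem?_eq_getElem hk]

theorem pvIncAt_eq (a2 : List Int) (k : Nat) : pvIncAt a2 k = pvAddAt a2 k 1 := rfl

-- one fold step that adds c x at slot k, summed over the whole list
theorem foldl_addAt_of {α : Type} (l : List α) (f : List Int → α → List Int)
    (c : α → Int) (k : Nat)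
    (h : ∀ (a : List Int) (x : α), x ∈ l → k < a.length → f a x = pvAddAt a k (c x)) :
    ∀ (a2 : List Int), k < a2.length → l.foldl f a2 = pvAddAt a2 k ((l.map c).sum) := by
  induction l with
  | nil => intro a2 hk; simp [pvAddAt_zero a2 k hk]
  | cons x t ih =>
    intro a2 hk
    have hx : f a2 x = pvAddAt a2 k (c x) := h a2 x (by simp) hk
    have hk' : k < (pvAddAt a2 k (c x)).length := by rw [pvAddAt_length]; exact hk
    calc (x :: t).foldl f a2 = t.foldl f (pvAddAt a2 k (c x)) := by rw [List.foldl_cons, hx]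
      _ = pvAddAt (pvAddAt a2 k (c x)) k ((t.map c).sum) :=
          ih (fun a y hy hka => h a y (by simp [hy]) hka) _ hk'
      _ = pvAddAt a2 k (c x + (t.map c).sum) := pvAddAt_pvAddAt a2 k _ _ hk
      _ = pvAddAt a2 k (((x :: t).map c).sum) := by simp

theorem pvWhile1_eq (x : Nat) : ∀ (a2 : List Int) (k : Nat), k < a2.length →
    pvWhile1 x a2 k = pvAddAt a2 k ((PySem.Int.bitLength (x : Int) : Nat) : Int) := by
  induction x using Nat.strong_induction_on with
  | _ x ih =>
    intro a2 k hk
    rw [pvWhile1]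
    by_cases h : 1 ≤ x
    · have hlt : x / 2 < x := Nat.div_lt_self (by omega) (by omega)
      have hk' : k < (pvIncAt a2 k).length := by rw [pvIncAt_eq, pvAddAt_length]; exact hk
      rw [dif_pos h, ih _ hlt _ k hk', pvIncAt_eq, pvAddAt_pvAddAt a2 k _ _ hk,
        PySem.Int.bitLength_natCast (by omega : 0 < x)]
      norm_num [add_comm]
    · have hx : x = 0 := by omega
      rw [dif_neg h, hx]
      simp [PySem.Int.bitLength_zero, pvAddAt_zero a2 k hk]

theorem pvWhile2_eq (x : Nat) : ∀ (a2 : List Int) (k : Nat), k < a2.length →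
    pvWhile2 x a2 k = pvAddAt a2 k ((PySem.Int.bitLength (x : Int) : Nat) : Int) := by
  induction x using Nat.strong_induction_on with
  | _ x ih =>
    intro a2 k hk
    rw [pvWhile2]
    by_cases h : 0 < x
    · have hlt : x / 2 < x := Nat.div_lt_self (by omega) (by omega)
      have hk' : k < (pvIncAt a2 k).length := by rw [pvIncAt_eq, pvAddAt_length]; exact hk
      rw [dif_pos h, ih _ hlt _ k hk', pvIncAt_eq, pvAddAt_pvAddAt a2 k _ _ hk,
        PySem.Int.bitLength_natCast (by omega : 0 < x)]
      norm_num [add_comm]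
    · have hx : x = 0 := by omega
      rw [dif_neg h, hx]
      simp [PySem.Int.bitLength_zero, pvAddAt_zero a2 k hk]

-- 6 · Σ_{t=1}^{n} t² = n(n+1)(2n+1)
theorem sq_sum_eq (n : Nat) :
    6 * ((List.range' 1 n).map (fun t3 => t3 ^ 2)).sum = n * (n + 1) * (2 * n + 1) := by
  induction n with
  | zero => simp
  | succ m ih =>
    rw [List.range'_1_concat]
    simp only [List.map_append, List.map_cons, List.map_nil, List.sum_append, List.sum_cons,
      List.sum_nil]
    ring_nf
    ring_nf at ih
    omega

theorem sq_sum_floordiv (n : Nat) :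
    (((List.range' 1 n).map (fun t3 => ((t3 ^ 2 : Nat) : Int))).sum)
      = PySem.Int.floordiv ((n : Int) * ((n : Int) + 1) * (2 * (n : Int) + 1)) 6 := by
  have hs : (((List.range' 1 n).map (fun t3 => ((t3 ^ 2 : Nat) : Int))).sum)
      = ((((List.range' 1 n).map (fun t3 => t3 ^ 2)).sum : Nat) : Int) := by
    rw [Nat.cast_list_sum, List.map_map]; rfl
  have h := sq_sum_eq n
  zify at h
  rw [hs, Nat.cast_list_sum, ← h, PySem.Int.floordiv_eq_ediv_of_pos (by norm_num)]
  exact (Int.mul_ediv_cancel_left _ (by norm_num : (6 : Int) ≠ 0)).symm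

-- fold congruence under an invariant preserved by the right-hand step
theorem foldl_congr_inv {α : Type} (l : List α) (f g : List Int → α → List Int)
    (P : List Int → Prop)
    (h : ∀ b x, x ∈ l → P b → f b x = g b x)
    (hg : ∀ b x, x ∈ l → P b → P (g b x)) :
    ∀ b, P b → l.foldl f b = l.foldl g b := by
  induction l with
  | nil => intro b _; rfl
  | cons x t ih =>
    intro b hb
    rw [List.foldl_cons, List.foldl_cons, h b x (by simp) hb]
    exact ih (fun b y hy => h b y (by simp [hy])) (fun b y hy => hg b y (by simp [hy]))
      _ (hg b x (by simp) hb)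

-- enumerate-style fold = index fold
theorem zipIdx_foldl_eq (l : List Int) (g : List Int → Nat → Int → List Int) :
    ∀ (s : Nat) (b : List Int),
      (l.zipIdx s).foldl (fun a vi => g a vi.2 vi.1) b
        = (List.range' s l.length).foldl (fun a i => g a i (l.getD (i - s) 0)) b := by
  induction l with
  | nil => intro s b; simp
  | cons x t ih =>
    intro s b
    rw [List.zipIdx_cons, List.length_cons, List.range'_succ, List.foldl_cons, List.foldl_cons]
    have h0 : (x :: t).getD (s - s) 0 = x := by simp
    rw [h0, ih (s + 1)]
    refine PySem.List.foldl_congr_mem _ _ _ _ (fun a i hi => ?_)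
    have hs : s + 1 ≤ i := (List.mem_range'_1.mp hi).1
    have hsub : i - s = (i - (s + 1)) + 1 := by omega
    rw [hsub]
    rfl

theorem func_eq_alt (arr : List Int) : func arr = func_alt arr := by
  unfold func func_alt
  refine Eq.trans ?_ (zipIdx_foldl_eq arr
    (fun a2 i v =>
      if v = 0 then
        pvAddAt a2 (i % 5)
          (((arr.length : Int) - i) * (PySem.Int.bitLength ((arr.length : Int) + 1) : Int))
      else if v = 1 then
        pvAddAt a2 (i % 5)
          ((arr.length : Int) * (arr.length : Int) * (PySem.Int.bitLength ((arr.length : Int) + 1) : Int))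
      else if v = 2 then
        pvAddAt a2 (i % 5)
          (PySem.Int.floordiv ((arr.length : Int) * ((arr.length : Int) + 1) * (2 * (arr.length : Int) + 1)) 6)
      else a2) 0 [0, 0, 0, 0, 0]).symm
  rw [← List.range_eq_range']
  simp only [Nat.sub_zero]
  refine foldl_congr_inv _ _ _ (fun a2 => a2.length = 5) ?_ ?_ _ (by simp)
  · intro a2 i hi h5
    have hin : i < arr.length := List.mem_range.mp hi
    have hk : i % 5 < a2.length := by rw [h5]; omega
    by_cases h0 : arr.getD i 0 = 0
    · rw [if_pos h0, if_pos h0,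
        foldl_addAt_of _ _
          (fun _ => ((PySem.Int.bitLength ((arr.length : Int) + 1) : Nat) : Int)) (i % 5)
          (fun a _ _ hka => by
            rw [pvWhile1_eq (arr.length + 1) a (i % 5) hka]; norm_num) a2 hk]
      congr 1
      simp only [List.map_const', List.sum_replicate, List.length_range', nsmul_eq_mul]
      push_cast [Nat.cast_sub (le_of_lt hin)]
      ring
    · rw [if_neg h0, if_neg h0]
      by_cases h1 : arr.getD i 0 = 1
      · rw [if_pos h1, if_pos h1,
          foldl_addAt_of _ _
            (fun _ => (arr.length : Int) *
              ((PySem.Int.bitLength ((arr.length : Int) + 1) : Nat) : Int)) (i % 5)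
            (fun a _ _ hka => by
              rw [foldl_addAt_of _ _
                (fun _ => ((PySem.Int.bitLength ((arr.length : Int) + 1) : Nat) : Int)) (i % 5)
                (fun a' _ _ hka' => by
                  rw [pvWhile2_eq (arr.length + 1) a' (i % 5) hka']; norm_num) a hka]
              congr 1
              simp [List.map_const', List.sum_replicate, List.length_range'])
            a2 hk]
        congr 1
        simp only [List.map_const', List.sum_replicate, List.length_reverse,
          List.length_range', nsmul_eq_mul]
        ring
      · rw [if_neg h1, if_neg h1]
        by_cases h2 : arr.getD i 0 = 2
        · rw [if_pos h2, if_pos h2,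
            foldl_addAt_of _ _ (fun t3 => ((t3 ^ 2 : Nat) : Int)) (i % 5)
              (fun a t3 _ hka => by
                rw [foldl_addAt_of _ _ (fun _ => (1 : Int)) (i % 5)
                  (fun a' _ _ _ => pvIncAt_eq a' (i % 5)) a hka]
                congr 1
                simp [List.map_const', List.sum_replicate, List.length_range])
              a2 hk]
          rw [sq_sum_floordiv]
        · rw [if_neg h2, if_neg h2]
  · intro a2 i _ h5
    by_cases h0 : arr.getD i 0 = 0
    · rw [if_pos h0, pvAddAt_length]; exact h5
    · rw [if_neg h0]
      by_cases h1 : arr.getD i 0 = 1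
      · rw [if_pos h1, pvAddAt_length]; exact h5
      · rw [if_neg h1]
        by_cases h2 : arr.getD i 0 = 2
        · rw [if_pos h2, pvAddAt_length]; exact h5
        · rw [if_neg h2]; exact h5

-- ===== VERDICT (by name: the statement is the Claim_ definition above) =====
theorem func_spec : Claim_equal_func := by
  intro arr _
  unfold Spec_func
  exact func_eq_alt arr
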